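-- pv_equiv track=rewrite | github.com/ivbeg/qddate | qddate/qdparser.py | _detect_separators
-- ===== SOURCE A (Python) =====
-- def _detect_separators(text):
--     """Quickly detect separator types in text.
--
--     :param text: Input string to scan
--     :type text: str
--     :return: Set of detected separator types
--     :rtype: set
--     """
--     if not text:
--         return set()
--
--     separators = set()
--     # Check first 20 chars for efficiency
--     scan_len = min(20, len(text))
--     for i in range(scan_len):
--         char = text[i]
--         if char == '/':
--             separators.add('slash')
--         elif char == '.':
--             separators.add('dot')
--         elif char == '-':
--             separators.add('dash')
--         elif char == ' ':
--             separators.add('space')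
--
--     # If no separators found and text is mostly digits, it might be 'none'
--     if not separators and text and text[0].isdigit():
--         # Check if it's a compact format like yyyymmdd or ddmmyyyy
--         if len(text) >= 8 and all(c.isdigit() for c in text[:8]):
--             separators.add('none')
--         else:
--             # Default to mixed if we can't determine
--             separators.add('mixed')
--     elif not separators:
--         separators.add('mixed')
--
--     return separators
-- ===== SOURCE B (Python) =====
-- def _detect_separators(text):
--     """Recursive re-implementation: consume text[:20] while removing matched
--     entries from a remaining separator table (instead of accumulating a set
--     with an if/elif chain); fallback block unchanged."""
--     if not text:
--         return set()
--
--     def scan(chars, remaining):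
--         if not chars:
--             return []
--         ch, rest = chars[0], chars[1:]
--         for j, (c, name) in enumerate(remaining):
--             if c == ch:
--                 return [name] + scan(rest, remaining[:j] + remaining[j + 1:])
--         return scan(rest, remaining)
--
--     found = scan(text[:20], [('/', 'slash'), ('.', 'dot'), ('-', 'dash'), (' ', 'space')])
--     if not found:
--         if text[0].isdigit():
--             if len(text) >= 8 and all(c.isdigit() for c in text[:8]):
--                 return {'none'}
--             return {'mixed'}
--         return {'mixed'}
--     return set(found)
-- ===== Notes on version B (the rewrite author's own statement) =====
-- stated objective: alternative
-- what changed: Replaces the per-character if/elif chain accumulating a found-set with a recursive scan that consumes a remaining-separator table (removing each entry on first match, so output is deduplicated by construction); the digit fallback is unchanged.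
import Mathlib
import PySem

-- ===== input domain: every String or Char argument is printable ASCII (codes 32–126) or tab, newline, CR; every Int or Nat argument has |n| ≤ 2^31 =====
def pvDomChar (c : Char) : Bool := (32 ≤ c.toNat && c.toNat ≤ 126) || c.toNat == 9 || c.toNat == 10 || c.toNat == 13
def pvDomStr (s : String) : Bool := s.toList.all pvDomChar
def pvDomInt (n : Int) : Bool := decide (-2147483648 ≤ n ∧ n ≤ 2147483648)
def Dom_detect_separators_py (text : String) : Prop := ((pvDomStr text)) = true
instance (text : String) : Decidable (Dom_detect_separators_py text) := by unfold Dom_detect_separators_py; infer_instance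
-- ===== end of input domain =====

-- B replaces A's if/elif char scan with a recursive scan over a shrinking separator table; same return value (alternative decomposition, not faster).

-- ===== PORT A =====
-- loop body of A's for-loop (the if/elif chain), kept as a named helper
def pvStepA (s : PySem.Set String) (c : Char) : PySem.Set String :=
  if c = '/' then PySem.Set.add s "slash"
  else if c = '.' then PySem.Set.add s "dot"
  else if c = '-' then PySem.Set.add s "dash"
  else if c = ' ' then PySem.Set.add s "space"
  else s

def detect_separators_py (text : String) : List String :=
  let cs := text.toList
  if cs = [] then []
  else
    let scanLen := min 20 cs.length
    let separators : PySem.Set String :=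
      (cs.take scanLen).foldl pvStepA PySem.Set.empty
    if separators = [] then
      (match cs with
       | c :: _ =>
          if PySem.Chars.isdigit c then
            if 8 ≤ cs.length ∧ (cs.take 8).all PySem.Chars.isdigit then
              PySem.Set.add separators "none"
            else PySem.Set.add separators "mixed"
          else PySem.Set.add separators "mixed"
       | [] => PySem.Set.add separators "mixed")
    else separators

-- ===== PORT B =====
def pvScanB : List Char → List (Char × String) → List String
  | [], _ => []
  | c :: rest, remaining =>
    match remaining.find? (fun e => e.1 == c) with
    | some e => e.2 :: pvScanB rest (remaining.erase e)
    | none => pvScanB rest remaining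

def detect_separators_py_alt (text : String) : List String :=
  let cs := text.toList
  if cs = [] then []
  else
    let found := pvScanB (cs.take 20)
      [('/', "slash"), ('.', "dot"), ('-', "dash"), (' ', "space")]
    if found = [] then
      (match cs with
       | c :: _ =>
          if PySem.Chars.isdigit c then
            if 8 ≤ cs.length ∧ (cs.take 8).all PySem.Chars.isdigit then ["none"]
            else ["mixed"]
          else ["mixed"]
       | [] => ["mixed"])
    else found

-- ===== PRECONDITION & SPEC =====
def Spec_detect_separators_py (text : String) (out : List String) : Prop := out = detect_separators_py_alt text
instance (text : String) (out : List String) : Decidable (Spec_detect_separators_py text out) := by unfold Spec_detect_separators_py; infer_instance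

-- ===== CLAIM (what is proved, stated in full; the proofs are below) =====
def Claim_equal_detect_separators_py : Prop := ∀ (text : String), Dom_detect_separators_py text → Spec_detect_separators_py text (detect_separators_py text)

-- ===== LEMMAS AND PROOFS =====

def pvTableFilter (acc : List String) : List (Char × String) :=
  ([('/', "slash"), ('.', "dot"), ('-', "dash"), (' ', "space")] :
      List (Char × String)).filter (fun e => ¬ acc.contains e.2)

lemma pvScan_eq (cs : List Char) : ∀ acc : List String,
    cs.foldl pvStepA acc = acc ++ pvScanB cs (pvTableFilter acc) := by
  induction cs with
  | nil => intro acc; simp [pvScanB]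
  | cons c rest ih =>
    intro acc
    rw [List.foldl_cons, ih]
    by_cases hc1 : c = '/'
    · subst hc1
      by_cases h1 : "slash" ∈ acc
      · simp [pvStepA, pvScanB, pvTableFilter, PySem.Set.add, PySem.Set.contains,
          List.find?_filter, h1]
      · by_cases h2 : "dot" ∈ acc <;> by_cases h3 : "dash" ∈ acc <;> by_cases h4 : "space" ∈ acc <;>
          simp [pvStepA, pvScanB, pvTableFilter, PySem.Set.add, PySem.Set.contains, h1, h2, h3, h4]
    · by_cases hc2 : c = '.'
      · subst hc2
        by_cases h2 : "dot" ∈ acc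
        · simp [pvStepA, pvScanB, pvTableFilter, PySem.Set.add, PySem.Set.contains,
            List.find?_filter, h2, hc1]
        · by_cases h1 : "slash" ∈ acc <;> by_cases h3 : "dash" ∈ acc <;> by_cases h4 : "space" ∈ acc <;>
            simp [pvStepA, pvScanB, pvTableFilter, PySem.Set.add, PySem.Set.contains, h1, h2, h3, h4, hc1]
      · by_cases hc3 : c = '-'
        · subst hc3
          by_cases h3 : "dash" ∈ acc
          · simp [pvStepA, pvScanB, pvTableFilter, PySem.Set.add, PySem.Set.contains,
              List.find?_filter, h3, hc1, hc2]
          · by_cases h1 : "slash" ∈ acc <;> by_cases h2 : "dot" ∈ acc <;> by_cases h4 : "space" ∈ acc <;>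
              simp [pvStepA, pvScanB, pvTableFilter, PySem.Set.add, PySem.Set.contains, h1, h2, h3, h4, hc1, hc2]
        · by_cases hc4 : c = ' '
          · subst hc4
            by_cases h4 : "space" ∈ acc
            · simp [pvStepA, pvScanB, pvTableFilter, PySem.Set.add, PySem.Set.contains,
                List.find?_filter, h4, hc1, hc2, hc3]
            · by_cases h1 : "slash" ∈ acc <;> by_cases h2 : "dot" ∈ acc <;> by_cases h3 : "dash" ∈ acc <;>
                simp [pvStepA, pvScanB, pvTableFilter, PySem.Set.add, PySem.Set.contains, h1, h2, h3, h4, hc1, hc2, hc3]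
          · have e1 : ¬ ('/' = c) := fun h => hc1 h.symm
            have e2 : ¬ ('.' = c) := fun h => hc2 h.symm
            have e3 : ¬ ('-' = c) := fun h => hc3 h.symm
            have e4 : ¬ (' ' = c) := fun h => hc4 h.symm
            simp [pvStepA, pvScanB, pvTableFilter, List.find?_filter, hc1, hc2, hc3, hc4,
              e1, e2, e3, e4]

lemma pvTake_min (cs : List Char) : cs.take (min 20 cs.length) = cs.take 20 := by
  rcases le_total cs.length 20 with h | h
  · rw [min_eq_right h, List.take_length, List.take_of_length_le h]
  · rw [min_eq_left h]

-- ===== VERDICT (by name: the statement is the Claim_ definition above) =====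
theorem detect_separators_py_spec : Claim_equal_detect_separators_py := by
  unfold Claim_equal_detect_separators_py
  intro text _
  unfold Spec_detect_separators_py detect_separators_py detect_separators_py_alt
  simp only
  have h := pvScan_eq (text.toList.take 20) []
  rw [pvTake_min]
  have h2 : pvTableFilter [] = [('/', "slash"), ('.', "dot"), ('-', "dash"), (' ', "space")] := by
    simp [pvTableFilter]
  rw [h2] at h
  simp only [List.nil_append] at h
  simp only [PySem.Set.empty]
  rw [h]
  by_cases h0 : text.toList = []
  · simp [h0]
  · simp only [if_neg h0]
    by_cases hf : pvScanB (text.toList.take 20)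
        [('/', "slash"), ('.', "dot"), ('-', "dash"), (' ', "space")] = []
    · cases htl : text.toList with
      | nil => exact absurd htl h0
      | cons c tl =>
        rw [htl] at hf
        simp only [hf, reduceIte, PySem.Set.add, PySem.Set.contains, List.contains_nil,
          List.nil_append]
        split_ifs <;> simp_all
    · simp only [if_neg hf]
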